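-- pv_equiv track=rewrite | github.com/nickbroon/vplane-config-qos | vyatta_policy_qos_vci/qos_op_mode.py | convert_dscp_map
-- ===== SOURCE A (Python) =====
-- TC_SHIFT = 2
--
-- TC_MASK = 0x3
--
-- WRR_MASK = 0x7
--
-- def get_traffic_class(qmap_value):
--     """ Extract the traffic-class from a qmap value """
--     return qmap_value & TC_MASK
--
-- def get_queue_number(qmap_value):
--     """ Extract the wrr-id from a qmap value """
--     return (qmap_value >> TC_SHIFT) & WRR_MASK
--
-- def convert_dscp_map(dscp_map_in):
--     """
--     Convert a 'dscp2q' JSON array into Yang compatible 'tagged' JSON array,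
--     tagged by dscp-value (0..63).
--     Also build a tc-id/wrr-id to dscp mapping.
--     """
--     dscp_map_out = []
--     tc_queue_to_dscp_map = {}
--     dscp_id = 0
--
--     if dscp_map_in is not None:
--         for dscp_map_value in dscp_map_in:
--             dscp_out = {}
--             dscp_values = []
--             tc_id = get_traffic_class(dscp_map_value)
--             q_id = get_queue_number(dscp_map_value)
--
--             dscp_out['dscp'] = dscp_id
--             # The following two elements are defined in
--             # vyatta-policy-qos-groupings-v1.yang hence the need
--             # to include their namespace.
--             dscp_out['vyatta-policy-qos-groupings-v1:traffic-class'] = tc_id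
--             dscp_out['vyatta-policy-qos-groupings-v1:queue'] = q_id
--             dscp_map_out.append(dscp_out)
--
--             try:
--                 dscp_values = tc_queue_to_dscp_map[tc_id][q_id]
--
--             except KeyError:
--                 dscp_values = []
--
--             dscp_values.append(dscp_id)
--
--             try:
--                 tc_queue_to_dscp_map[tc_id][q_id] = dscp_values
--
--             except KeyError:
--                 try:
--                     tc_queue_to_dscp_map[tc_id] = {}
--                     tc_queue_to_dscp_map[tc_id][q_id] = dscp_values
--
--                 except KeyError:
--                     pass
--
--             dscp_id += 1
--
--     return (dscp_map_out, tc_queue_to_dscp_map)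
-- ===== SOURCE B (Python) =====
-- def convert_dscp_map(dscp_map_in):
--     """
--     Convert a 'dscp2q' JSON array into Yang compatible 'tagged' JSON array,
--     tagged by dscp-value (0..63). Also build a tc-id/wrr-id to dscp mapping.
--
--     Gather-by-bucket strategy: first enumerate the distinct traffic-classes
--     (and, per tc, the distinct queues) in first-occurrence order, then fill
--     each bucket with a filtered scan for the matching dscp ids.
--     """
--     values = dscp_map_in if dscp_map_in is not None else []
--     tagged = [{'dscp': i,
--                'vyatta-policy-qos-groupings-v1:traffic-class': v & 0x3,
--                'vyatta-policy-qos-groupings-v1:queue': (v >> 2) & 0x7}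
--               for i, v in enumerate(values)]
--     rev = {}
--     for tc in dict.fromkeys(v & 0x3 for v in values):
--         rev[tc] = {
--             q: [i for i, v in enumerate(values)
--                 if v & 0x3 == tc and (v >> 2) & 0x7 == q]
--             for q in dict.fromkeys((v >> 2) & 0x7 for v in values
--                                    if v & 0x3 == tc)}
--     return (tagged, rev)
-- ===== Notes on version B (the rewrite author's own statement) =====
-- stated objective: alternative
-- what changed: A scatters: one loop with a running counter pushes each entry into a nested dict via try/except KeyError; B gathers: it first lists the distinct traffic-classes (and per tc the distinct queues) in first-occurrence order with dict.fromkeys, then fills each tc/queue bucket by a filtered scan over enumerate for the matching dscp ids.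
import Mathlib
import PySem

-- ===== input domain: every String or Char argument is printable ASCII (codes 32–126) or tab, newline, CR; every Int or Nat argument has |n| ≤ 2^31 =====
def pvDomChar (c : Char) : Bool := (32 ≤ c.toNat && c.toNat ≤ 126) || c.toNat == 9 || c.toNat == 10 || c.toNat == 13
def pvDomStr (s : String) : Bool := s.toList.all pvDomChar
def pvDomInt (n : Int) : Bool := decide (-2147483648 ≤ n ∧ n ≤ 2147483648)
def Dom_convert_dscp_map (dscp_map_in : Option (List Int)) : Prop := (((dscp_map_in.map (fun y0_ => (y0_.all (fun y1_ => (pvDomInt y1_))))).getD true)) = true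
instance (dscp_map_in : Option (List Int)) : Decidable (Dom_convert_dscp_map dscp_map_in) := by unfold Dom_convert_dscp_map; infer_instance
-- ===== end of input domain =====

-- B replaces A's single scatter loop (running counter + try/except nested-dict pushes) by a
-- gather-by-bucket strategy: distinct tcs/queues first, then a filtered scan fills each bucket;
-- return values are proved equal on the whole domain.

-- ===== PORT A =====
-- def get_traffic_class(qmap_value): return qmap_value & TC_MASK
def get_traffic_class (qmap_value : Int) : Int := PySem.Int.band qmap_value 0x3

-- def get_queue_number(qmap_value): return (qmap_value >> TC_SHIFT) & WRR_MASK
def get_queue_number (qmap_value : Int) : Int := PySem.Int.band (qmap_value >>> (2 : Nat)) 0x7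

-- loop body of A: state = (dscp_map_out, tc_queue_to_dscp_map, dscp_id)
def convert_dscp_map_step
    (st : List (List (String × Int)) × PySem.Dict Int (PySem.Dict Int (List Int)) × Int)
    (dscp_map_value : Int) :
    List (List (String × Int)) × PySem.Dict Int (PySem.Dict Int (List Int)) × Int :=
  let out := st.1
  let m := st.2.1
  let dscp_id := st.2.2
  let tc_id := get_traffic_class dscp_map_value
  let q_id := get_queue_number dscp_map_value
  -- dscp_out['dscp']=…; …:'traffic-class'=…; …:'queue'=…  (dict literal built in order)
  let dscp_out : List (String × Int) :=
    [("dscp", dscp_id),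
     ("vyatta-policy-qos-groupings-v1:traffic-class", tc_id),
     ("vyatta-policy-qos-groupings-v1:queue", q_id)]
  let out := out ++ [dscp_out]
  -- try: dscp_values = m[tc_id][q_id] except KeyError: dscp_values = []
  let dscp_values : List Int :=
    match m.get? tc_id with
    | some inner =>
      match inner.get? q_id with
      | some vs => vs
      | none => []
    | none => []
  let dscp_values := dscp_values ++ [dscp_id]
  -- try: m[tc_id][q_id] = dscp_values  except KeyError: m[tc_id] = {}; m[tc_id][q_id] = dscp_values
  let m :=
    match m.get? tc_id with
    | some inner => m.insert tc_id (inner.insert q_id dscp_values)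
    | none =>
      let m := m.insert tc_id PySem.Dict.empty
      match m.get? tc_id with
      | some inner => m.insert tc_id (inner.insert q_id dscp_values)
      | none => m   -- except KeyError: pass  (unreachable)
  (out, m, dscp_id + 1)

def convert_dscp_map (dscp_map_in : Option (List Int)) :
    (List (List (String × Int))) × (List (Int × List (Int × List Int))) :=
  let st : List (List (String × Int)) × PySem.Dict Int (PySem.Dict Int (List Int)) × Int :=
    match dscp_map_in with
    | none => ([], PySem.Dict.empty, 0)
    | some l => l.foldl convert_dscp_map_step ([], PySem.Dict.empty, 0)
  (st.1, st.2.1.items.map (fun p => (p.1, p.2.items)))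

-- ===== PORT B =====
-- B builds the reverse map as dicts keyed by ALREADY-DISTINCT keys inserted in order, so under
-- the dict → insertion-ordered association list convention each dict IS the list of its pairs
-- in key order; 'dict.fromkeys' is PySem.List.dedup.
def convert_dscp_map_alt (dscp_map_in : Option (List Int)) :
    (List (List (String × Int))) × (List (Int × List (Int × List Int))) :=
  let values := dscp_map_in.getD []        -- if dscp_map_in is not None else []
  let tagged : List (List (String × Int)) :=
    (PySem.List.enumerate values).map (fun (iv : Int × Int) =>
      [("dscp", iv.1),
       ("vyatta-policy-qos-groupings-v1:traffic-class", PySem.Int.band iv.2 0x3),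
       ("vyatta-policy-qos-groupings-v1:queue", PySem.Int.band ((iv.2 : Int) >>> (2 : Nat)) 0x7)])
  let rev : List (Int × List (Int × List Int)) :=
    (PySem.List.dedup (values.map (fun v => PySem.Int.band v 0x3))).map (fun tc =>
      (tc,
       (PySem.List.dedup ((values.filter (fun v => PySem.Int.band v 0x3 == tc)).map
           (fun v => PySem.Int.band ((v : Int) >>> (2 : Nat)) 0x7))).map (fun q =>
         (q, ((PySem.List.enumerate values).filter (fun (iv : Int × Int) =>
                PySem.Int.band iv.2 0x3 == tc && PySem.Int.band ((iv.2 : Int) >>> (2 : Nat)) 0x7 == q)).map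
              (·.1)))))
  (tagged, rev)

-- ===== PRECONDITION & SPEC =====
def Spec_convert_dscp_map (dscp_map_in : Option (List Int)) (out : (List (List (String × Int))) × (List (Int × List (Int × List Int)))) : Prop := out = convert_dscp_map_alt dscp_map_in
instance (dscp_map_in : Option (List Int)) (out : (List (List (String × Int))) × (List (Int × List (Int × List Int)))) : Decidable (Spec_convert_dscp_map dscp_map_in out) := by unfold Spec_convert_dscp_map; infer_instance

-- ===== CLAIM (what is proved, stated in full; the proofs are below) =====
def Claim_equal_convert_dscp_map : Prop := ∀ (dscp_map_in : Option (List Int)), Dom_convert_dscp_map dscp_map_in → Spec_convert_dscp_map dscp_map_in (convert_dscp_map dscp_map_in)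

-- ===== LEMMAS AND PROOFS =====

-- proof-side names for A's two key extractors on an enumerated pair
def pvGroup
    (m : PySem.Dict Int (PySem.Dict Int (List Int))) (iv : Int × Int) :
    PySem.Dict Int (PySem.Dict Int (List Int)) :=
  m.insert (PySem.Int.band iv.2 0x3)
    ((m.getD (PySem.Int.band iv.2 0x3) PySem.Dict.empty).insert
      (PySem.Int.band ((iv.2 : Int) >>> (2 : Nat)) 0x7)
      ((m.getD (PySem.Int.band iv.2 0x3) PySem.Dict.empty).getD
        (PySem.Int.band ((iv.2 : Int) >>> (2 : Nat)) 0x7) [] ++ [iv.1]))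

def pvIStep (n : PySem.Dict Int (List Int)) (iv : Int × Int) : PySem.Dict Int (List Int) :=
  n.insert (PySem.Int.band ((iv.2 : Int) >>> (2 : Nat)) 0x7)
    (n.getD (PySem.Int.band ((iv.2 : Int) >>> (2 : Nat)) 0x7) [] ++ [iv.1])

-- one iteration of A's loop = emit the tagged row and perform the grouping step
lemma step_eq (out : List (List (String × Int)))
    (m : PySem.Dict Int (PySem.Dict Int (List Int))) (k v : Int) :
    convert_dscp_map_step (out, m, k) v =
      (out ++ [[("dscp", k),
        ("vyatta-policy-qos-groupings-v1:traffic-class", PySem.Int.band v 0x3),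
        ("vyatta-policy-qos-groupings-v1:queue", PySem.Int.band ((v : Int) >>> (2 : Nat)) 0x7)]],
       pvGroup m (k, v), k + 1) := by
  unfold convert_dscp_map_step pvGroup get_traffic_class get_queue_number
  simp only []
  cases h : m.get? (PySem.Int.band v 0x3) with
  | some inner =>
    simp only [h, PySem.Dict.getD_eq_get?_getD, Option.getD_some]
    cases hq : inner.get? (PySem.Int.band ((v : Int) >>> (2 : Nat)) 0x7) <;> rfl
  | none =>
    simp only [h, PySem.Dict.get?_insert_self, PySem.Dict.insert_insert_self,
      PySem.Dict.getD_eq_get?_getD, PySem.Dict.get?_empty, Option.getD_none, List.nil_append]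

-- A's fold from an arbitrary state = the rows of the enumerated suffix plus a pvGroup fold
lemma fold_eq (l : List Int) : ∀ (out : List (List (String × Int)))
    (m : PySem.Dict Int (PySem.Dict Int (List Int))) (k : Int),
    l.foldl convert_dscp_map_step (out, m, k) =
      (out ++ (PySem.List.enumerate l k).map (fun (iv : Int × Int) =>
        [("dscp", iv.1),
         ("vyatta-policy-qos-groupings-v1:traffic-class", PySem.Int.band iv.2 0x3),
         ("vyatta-policy-qos-groupings-v1:queue", PySem.Int.band ((iv.2 : Int) >>> (2 : Nat)) 0x7)]),
       (PySem.List.enumerate l k).foldl pvGroup m,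
       k + l.length) := by
  induction l with
  | nil => intro out m k; simp [PySem.List.enumerate_nil]
  | cons v t ih =>
    intro out m k
    rw [PySem.List.enumerate_cons]
    simp only [List.foldl_cons, List.map_cons, List.length_cons]
    rw [step_eq, ih]
    refine Prod.ext ?_ (Prod.ext rfl ?_)
    · simp
    · simp only []
      push_cast
      ring

-- the bucket of the outer fold at key k is an inner fold over the matching entries
lemma outer_getD (l : List (Int × Int)) :
    ∀ (m : PySem.Dict Int (PySem.Dict Int (List Int))) (k : Int),
    (l.foldl pvGroup m).getD k PySem.Dict.empty =
      (l.filter (fun iv => PySem.Int.band iv.2 0x3 == k)).foldl pvIStep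
        (m.getD k PySem.Dict.empty) := by
  induction l with
  | nil => intro m k; simp
  | cons iv t ih =>
    intro m k
    simp only [List.foldl_cons, List.filter_cons]
    by_cases h : PySem.Int.band iv.2 0x3 = k
    · simp only [h, beq_self_eq_true, if_true, List.foldl_cons]
      rw [ih]
      congr 1
      unfold pvGroup pvIStep
      simp [h]
    · have hb : (PySem.Int.band iv.2 0x3 == k) = false := by simp [h]
      simp only [hb, if_neg, Bool.false_eq_true, not_false_iff]
      rw [ih]
      congr 1
      unfold pvGroup
      simp only [PySem.Dict.getD_insert]
      rw [if_neg (by intro hk; exact h hk.symm)]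

-- the inner fold's bucket at q collects the first components of the matching entries
lemma inner_getD (l : List (Int × Int)) :
    ∀ (n : PySem.Dict Int (List Int)) (q : Int),
    (l.foldl pvIStep n).getD q [] =
      n.getD q [] ++ (l.filter (fun iv => PySem.Int.band ((iv.2 : Int) >>> (2 : Nat)) 0x7 == q)).map (·.1) := by
  induction l with
  | nil => intro n q; simp
  | cons iv t ih =>
    intro n q
    simp only [List.foldl_cons, List.filter_cons]
    by_cases h : PySem.Int.band ((iv.2 : Int) >>> (2 : Nat)) 0x7 = q
    · simp only [h, beq_self_eq_true, if_true]
      rw [ih]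
      unfold pvIStep
      simp [h]
    · have hb : (PySem.Int.band ((iv.2 : Int) >>> (2 : Nat)) 0x7 == q) = false := by simp [h]
      simp only [hb, if_neg, Bool.false_eq_true, not_false_iff]
      rw [ih]
      unfold pvIStep
      simp only [PySem.Dict.getD_insert]
      rw [if_neg (by intro hk; exact h hk.symm)]

-- mapping/filtering an enumerate through functions of the VALUE forgets the indices
lemma enum_map_snd {α β : Type} (f : α → β) (l : List α) :
    ∀ (s : Int), (PySem.List.enumerate l s).map (fun iv => f iv.2) = l.map f := by
  induction l with
  | nil => intro s; simp [PySem.List.enumerate_nil]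
  | cons x t ih => intro s; rw [PySem.List.enumerate_cons]; simp [ih]

lemma enum_filter_map_snd {α β : Type} (p : α → Bool) (f : α → β) (l : List α) :
    ∀ (s : Int),
    ((PySem.List.enumerate l s).filter (fun iv => p iv.2)).map (fun iv => f iv.2) =
      (l.filter p).map f := by
  induction l with
  | nil => intro s; simp [PySem.List.enumerate_nil]
  | cons x t ih =>
    intro s
    rw [PySem.List.enumerate_cons]
    simp only [List.filter_cons]
    by_cases h : p x
    · simp [h, ih]
    · simp [h, ih]

-- the nested grouping fold, rendered as B's gather-by-bucket expression
lemma group_items (e : List (Int × Int)) :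
    ((e.foldl pvGroup PySem.Dict.empty).items.map (fun p => (p.1, p.2.items))) =
      (PySem.Set.ofList (e.map (fun iv => PySem.Int.band iv.2 0x3))).map (fun tc =>
        (tc,
         (PySem.Set.ofList ((e.filter (fun iv => PySem.Int.band iv.2 0x3 == tc)).map
             (fun iv => PySem.Int.band ((iv.2 : Int) >>> (2 : Nat)) 0x7))).map (fun q =>
           (q, ((e.filter (fun iv => PySem.Int.band iv.2 0x3 == tc)).filter
                  (fun iv => PySem.Int.band ((iv.2 : Int) >>> (2 : Nat)) 0x7 == q)).map (·.1))))) := by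
  have hnd : ((e.foldl pvGroup PySem.Dict.empty).keys).Nodup := by
    have := PySem.Dict.nodup_keys_foldl_insert_key e
      (key := fun iv => PySem.Int.band iv.2 0x3)
      (f := fun m iv =>
        (m.getD (PySem.Int.band iv.2 0x3) PySem.Dict.empty).insert
          (PySem.Int.band ((iv.2 : Int) >>> (2 : Nat)) 0x7)
          ((m.getD (PySem.Int.band iv.2 0x3) PySem.Dict.empty).getD
            (PySem.Int.band ((iv.2 : Int) >>> (2 : Nat)) 0x7) [] ++ [iv.1]))
      PySem.Dict.empty (by simp)
    exact this
  have hkeys : (e.foldl pvGroup PySem.Dict.empty).keys =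
      PySem.Set.ofList (e.map (fun iv => PySem.Int.band iv.2 0x3)) := by
    have := PySem.Dict.keys_foldl_insert_key e
      (key := fun iv => PySem.Int.band iv.2 0x3)
      (f := fun m iv =>
        (m.getD (PySem.Int.band iv.2 0x3) PySem.Dict.empty).insert
          (PySem.Int.band ((iv.2 : Int) >>> (2 : Nat)) 0x7)
          ((m.getD (PySem.Int.band iv.2 0x3) PySem.Dict.empty).getD
            (PySem.Int.band ((iv.2 : Int) >>> (2 : Nat)) 0x7) [] ++ [iv.1]))
      PySem.Dict.empty
    rw [PySem.Dict.keys_empty, PySem.Set.update_nil_left] at this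
    exact this
  rw [PySem.Dict.items_eq_map_keys _ hnd PySem.Dict.empty, hkeys, List.map_map]
  refine List.map_congr_left (fun tc _ => ?_)
  simp only [Function.comp]
  congr 1
  rw [outer_getD, PySem.Dict.getD_empty]
  set l' := e.filter (fun iv => PySem.Int.band iv.2 0x3 == tc) with hl'
  have hnd' : ((l'.foldl pvIStep PySem.Dict.empty).keys).Nodup := by
    have := PySem.Dict.nodup_keys_foldl_insert_key l'
      (key := fun iv => PySem.Int.band ((iv.2 : Int) >>> (2 : Nat)) 0x7)
      (f := fun n iv => n.getD (PySem.Int.band ((iv.2 : Int) >>> (2 : Nat)) 0x7) [] ++ [iv.1])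
      PySem.Dict.empty (by simp)
    exact this
  have hkeys' : (l'.foldl pvIStep PySem.Dict.empty).keys =
      PySem.Set.ofList (l'.map (fun iv => PySem.Int.band ((iv.2 : Int) >>> (2 : Nat)) 0x7)) := by
    have := PySem.Dict.keys_foldl_insert_key l'
      (key := fun iv => PySem.Int.band ((iv.2 : Int) >>> (2 : Nat)) 0x7)
      (f := fun n iv => n.getD (PySem.Int.band ((iv.2 : Int) >>> (2 : Nat)) 0x7) [] ++ [iv.1])
      PySem.Dict.empty
    rw [PySem.Dict.keys_empty, PySem.Set.update_nil_left] at this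
    exact this
  rw [PySem.Dict.items_eq_map_keys _ hnd' ([] : List Int), hkeys']
  refine List.map_congr_left (fun q _ => ?_)
  congr 1
  rw [inner_getD, PySem.Dict.getD_empty, List.nil_append]

-- ===== VERDICT (by name: the statement is the Claim_ definition above) =====
theorem convert_dscp_map_spec : Claim_equal_convert_dscp_map := by
  intro dscp_map_in _
  unfold Spec_convert_dscp_map convert_dscp_map convert_dscp_map_alt
  cases dscp_map_in with
  | none => rfl
  | some l =>
    simp only [Option.getD_some]
    rw [fold_eq l [] PySem.Dict.empty 0]
    simp only [List.nil_append]
    refine Prod.ext rfl ?_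
    simp only []
    rw [group_items]
    simp only [PySem.List.dedup_eq_ofList]
    rw [enum_map_snd (fun v => PySem.Int.band v 0x3) l 0]
    refine List.map_congr_left (fun tc _ => ?_)
    congr 1
    rw [enum_filter_map_snd (fun v => PySem.Int.band v 0x3 == tc)
      (fun v => PySem.Int.band ((v : Int) >>> (2 : Nat)) 0x7) l 0]
    refine List.map_congr_left (fun q _ => ?_)
    congr 1
    rw [List.filter_filter]
    congr 1
    exact List.filter_congr (fun a _ => Bool.and_comm _ _)
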